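-- pv_equiv track=rewrite | github.com/myoshi2891/Algorithm-DataStructures | Algorithm/Rolling Hash/other/string comparison/string-comparison.py | count_equal_pairs
-- ===== SOURCE A (Python) =====
-- from typing import List, Tuple
--
-- def compute_rolling_hash(s: str, p: int, x: int) -> int:
--     """
--     文字列のRolling Hashを計算
--     :param s: 対象文字列
--     :param p: 法（大きな素数）
--     :param x: 基数（素数）
--     :return: ハッシュ値
--     """
--     hash_val: int = 0
--     for c in s:
--         hash_val = (hash_val * x + ord(c)) % p
--     return hash_val
--
-- def count_equal_pairs(strings: List[str]) -> int:
--     """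
--     文字列リストから一致するペアの個数を返す（Rolling Hash 使用）
--     :param strings: 文字列のリスト
--     :return: 一致する文字列ペア数
--     """
--     P1: int = 10**9 + 7
--     X1: int = 911
--     P2: int = 10**9 + 9
--     X2: int = 3571
--
--     hash_map: dict[Tuple[int, int], int] = {}
--
--     for s in strings:
--         h1 = compute_rolling_hash(s, P1, X1)
--         h2 = compute_rolling_hash(s, P2, X2)
--         key = (h1, h2)
--         hash_map[key] = hash_map.get(key, 0) + 1
--
--     count: int = 0
--     for freq in hash_map.values():
--         if freq >= 2:
--             count += freq * (freq - 1) // 2  # nC2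
--
--     return count
-- ===== SOURCE B (Python) =====
-- from typing import List, Tuple
--
-- def compute_rolling_hash(s: str, p: int, x: int) -> int:
--     hash_val: int = 0
--     for c in s:
--         hash_val = (hash_val * x + ord(c)) % p
--     return hash_val
--
-- def count_equal_pairs(strings: List[str]) -> int:
--     # One incremental pass: each string contributes the number of EARLIER
--     # strings with the same double-hash key; no frequency table pass, no nC2.
--     P1: int = 10**9 + 7
--     X1: int = 911
--     P2: int = 10**9 + 9
--     X2: int = 3571
--     seen: dict = {}
--     total: int = 0
--     for s in strings:
--         key = (compute_rolling_hash(s, P1, X1), compute_rolling_hash(s, P2, X2))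
--         c = seen.get(key, 0)
--         total += c
--         seen[key] = c + 1
--     return total
-- ===== Notes on version B (the rewrite author's own statement) =====
-- stated objective: simpler
-- what changed: Replaces A's two-phase build-frequency-dict-then-sum-freq*(freq-1)//2 with a single incremental pass that adds, for each string, the number of earlier strings sharing its (h1,h2) key (handshake counting), so the combinatorial formula and the second loop disappear.
import Mathlib
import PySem

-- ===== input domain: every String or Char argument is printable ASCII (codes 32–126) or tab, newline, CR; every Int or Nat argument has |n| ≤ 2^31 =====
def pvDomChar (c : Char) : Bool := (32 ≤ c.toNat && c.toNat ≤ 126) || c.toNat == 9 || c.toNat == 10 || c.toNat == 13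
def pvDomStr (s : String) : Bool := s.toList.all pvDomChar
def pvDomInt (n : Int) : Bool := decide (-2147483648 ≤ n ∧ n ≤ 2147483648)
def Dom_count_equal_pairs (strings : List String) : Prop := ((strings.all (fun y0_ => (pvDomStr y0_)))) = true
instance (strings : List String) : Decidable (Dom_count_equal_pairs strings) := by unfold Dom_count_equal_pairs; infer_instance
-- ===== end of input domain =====

-- B replaces the frequency-dict + nC2 summation with a single incremental pass
-- adding, per string, the number of earlier strings with the same key (simpler).

-- ===== PORT A =====
def compute_rolling_hash (s : String) (p : Int) (x : Int) : Int :=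
  s.toList.foldl (fun hash_val c => PySem.Int.mod (hash_val * x + (c.toNat : Int)) p) 0

def count_equal_pairs (strings : List String) : Int :=
  let P1 : Int := 10 ^ 9 + 7
  let X1 : Int := 911
  let P2 : Int := 10 ^ 9 + 9
  let X2 : Int := 3571
  let hash_map : PySem.Dict (Int × Int) Int :=
    strings.foldl (fun d s =>
      let h1 := compute_rolling_hash s P1 X1
      let h2 := compute_rolling_hash s P2 X2
      let key := (h1, h2)
      d.insert key (d.getD key 0 + 1)) PySem.Dict.empty
  hash_map.values.foldl (fun count freq =>
    if freq ≥ 2 then count + PySem.Int.floordiv (freq * (freq - 1)) 2 else count) 0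

-- ===== PORT B =====
def count_equal_pairs_alt (strings : List String) : Int :=
  let P1 : Int := 10 ^ 9 + 7
  let X1 : Int := 911
  let P2 : Int := 10 ^ 9 + 9
  let X2 : Int := 3571
  (strings.foldl (fun st s =>
    let key := (compute_rolling_hash s P1 X1, compute_rolling_hash s P2 X2)
    let c := st.1.getD key 0
    (st.1.insert key (c + 1), st.2 + c)) ((PySem.Dict.empty : PySem.Dict (Int × Int) Int), (0 : Int))).2

-- ===== PRECONDITION & SPEC =====
def Spec_count_equal_pairs (strings : List String) (out : Int) : Prop := out = count_equal_pairs_alt strings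
instance (strings : List String) (out : Int) : Decidable (Spec_count_equal_pairs strings out) := by unfold Spec_count_equal_pairs; infer_instance

-- ===== CLAIM (what is proved, stated in full; the proofs are below) =====
def Claim_equal_count_equal_pairs : Prop := ∀ (strings : List String), Dom_count_equal_pairs strings → Spec_count_equal_pairs strings (count_equal_pairs strings)

-- ===== LEMMAS AND PROOFS =====

def pvKey (s : String) : Int × Int :=
  (compute_rolling_hash s (10 ^ 9 + 7) 911, compute_rolling_hash s (10 ^ 9 + 9) 3571)

def pvC2 (f : Int) : Int := PySem.Int.floordiv (f * (f - 1)) 2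

def pvS (ks : List (Int × Int)) : Int :=
  ((PySem.Set.ofList ks).map (fun k => pvC2 ((ks.count k : Int)))).sum

theorem pvC2_succ (c : Int) : pvC2 (c + 1) = pvC2 c + c := by
  obtain ⟨m, hm⟩ := Int.even_mul_succ_self (c - 1)
  have e1 : (c + 1) * ((c + 1) - 1) = 2 * (m + c) := by linear_combination hm
  have e2 : c * (c - 1) = 2 * m := by linear_combination hm
  unfold pvC2
  rw [PySem.Int.floordiv_eq_ediv_of_pos (by norm_num), PySem.Int.floordiv_eq_ediv_of_pos (by norm_num),
      e1, e2, Int.mul_ediv_cancel_left _ (by norm_num), Int.mul_ediv_cancel_left _ (by norm_num)]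

theorem pv_sum_map_sub_single {α : Type} [DecidableEq α] {l : List α} (hl : l.Nodup) {x : α}
    (hx : x ∈ l) (f g : α → Int) (h : ∀ k ∈ l, k ≠ x → g k = f k) :
    (l.map g).sum = (l.map f).sum + (g x - f x) := by
  induction l with
  | nil => cases hx
  | cons a t ih =>
    rcases List.mem_cons.mp hx with rfl | hxt
    · have ht : ∀ k ∈ t, g k = f k := by
        intro k hk
        exact h k (List.mem_cons_of_mem _ hk) (fun he => (List.nodup_cons.mp hl).1 (he ▸ hk))
      simp only [List.map_cons, List.sum_cons, List.map_congr_left ht]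
      ring
    · have hax : a ≠ x := fun he => (List.nodup_cons.mp hl).1 (he ▸ hxt)
      have := ih (List.nodup_cons.mp hl).2 hxt (fun k hk => h k (List.mem_cons_of_mem _ hk))
      simp only [List.map_cons, List.sum_cons, this, h a (List.mem_cons_self) hax]
      ring

theorem pvS_snoc (ks : List (Int × Int)) (x : Int × Int) :
    pvS (ks ++ [x]) = pvS ks + (ks.count x : Int) := by
  unfold pvS
  have hset : PySem.Set.ofList (ks ++ [x]) = PySem.Set.add (PySem.Set.ofList ks) x := by
    rw [PySem.Set.ofList_eq_foldl, PySem.Set.ofList_eq_foldl, List.foldl_append]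
    rfl
  by_cases hmem : x ∈ ks
  · have hadd : PySem.Set.add (PySem.Set.ofList ks) x = PySem.Set.ofList ks := by
      unfold PySem.Set.add
      simp [PySem.Set.contains, (PySem.Set.mem_ofList ks x).mpr hmem]
    rw [hset, hadd]
    have hxS : x ∈ PySem.Set.ofList ks := (PySem.Set.mem_ofList ks x).mpr hmem
    rw [pv_sum_map_sub_single (PySem.Set.nodup_ofList ks) hxS
      (fun k => pvC2 ((ks.count k : Int))) (fun k => pvC2 (((ks ++ [x]).count k : Int)))
      (by
        intro k _ hkx
        simp [List.count_append, Ne.symm hkx])]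
    have hc1 : (((ks ++ [x]).count x : Nat) : Int) = ((ks.count x : Nat) : Int) + 1 := by
      simp [List.count_append]
    rw [hc1, pvC2_succ]
    ring
  · have hadd : PySem.Set.add (PySem.Set.ofList ks) x = PySem.Set.ofList ks ++ [x] := by
      unfold PySem.Set.add
      simp [PySem.Set.contains, hmem]
    rw [hset, hadd]
    have hcongr : ∀ k ∈ PySem.Set.ofList ks,
        pvC2 (((ks ++ [x]).count k : Int)) = pvC2 ((ks.count k : Int)) := by
      intro k hk
      have hkx : k ≠ x := fun he => hmem (he ▸ (PySem.Set.mem_ofList ks k).mp hk)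
      simp [List.count_append, Ne.symm hkx]
    have hx0 : ks.count x = 0 := List.count_eq_zero.mpr hmem
    simp only [List.map_append, List.sum_append, List.map_cons, List.map_nil, List.sum_cons,
      List.sum_nil, List.map_congr_left hcongr]
    have hc1 : (((ks ++ [x]).count x : Nat) : Int) = 1 := by
      simp [List.count_append, hx0]
    rw [hc1, hx0]
    have : pvC2 1 = 0 := by decide
    rw [this]
    simp

theorem pvA_eq (strings : List String) :
    count_equal_pairs strings = pvS (strings.map pvKey) := by
  unfold count_equal_pairs
  have hfold : strings.foldl (fun d s =>
      let h1 := compute_rolling_hash s (10 ^ 9 + 7) 911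
      let h2 := compute_rolling_hash s (10 ^ 9 + 9) 3571
      let key := (h1, h2)
      d.insert key (d.getD key 0 + 1)) (PySem.Dict.empty : PySem.Dict (Int × Int) Int)
      = PySem.Dict.counter (strings.map pvKey) := by
    rw [← PySem.Dict.foldl_insert_getD_add_one_eq_counter, List.foldl_map]
    rfl
  simp only []
  rw [hfold]
  have hvals : (PySem.Dict.counter (strings.map pvKey)).values
      = (PySem.Set.ofList (strings.map pvKey)).map
          (fun k => (((strings.map pvKey).count k : Nat) : Int)) := by
    show ((PySem.Dict.counter (strings.map pvKey)).items.map (·.2)) = _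
    rw [PySem.Dict.items_counter, List.map_map]
    rfl
  rw [hvals]
  set S := PySem.Set.ofList (strings.map pvKey) with hS
  set ks := strings.map pvKey with hks
  have hmemcnt : ∀ f ∈ S.map (fun k => ((ks.count k : Nat) : Int)), (1 : Int) ≤ f := by
    intro f hf
    obtain ⟨k, hk, rfl⟩ := List.mem_map.mp hf
    have : k ∈ ks := (PySem.Set.mem_ofList ks k).mp hk
    have := List.count_pos_iff.mpr this
    omega
  have hcong : (S.map (fun k => ((ks.count k : Nat) : Int))).foldl
      (fun count freq => if freq ≥ 2 then count + PySem.Int.floordiv (freq * (freq - 1)) 2 else count) 0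
      = (S.map (fun k => ((ks.count k : Nat) : Int))).foldl (fun count freq => count + pvC2 freq) 0 := by
    apply PySem.List.foldl_congr_mem
    intro acc f hf
    by_cases h2 : (2 : Int) ≤ f
    · simp [h2, pvC2]
    · have h1 := hmemcnt f hf
      have : f = 1 := by omega
      subst this
      norm_num [pvC2, PySem.Int.floordiv]
  rw [hcong, PySem.List.foldl_add]
  unfold pvS
  rw [List.map_map]
  simp
  rfl

theorem pvB_inv (ks : List (Int × Int)) :
    ks.foldl (fun st k =>
      let c := st.1.getD k 0
      (st.1.insert k (c + 1), st.2 + c)) ((PySem.Dict.empty : PySem.Dict (Int × Int) Int), (0 : Int))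
    = (ks.foldl (fun d k => d.insert k (d.getD k 0 + 1)) PySem.Dict.empty, pvS ks) := by
  induction ks using List.reverseRecOn with
  | nil =>
    simp [pvS, PySem.Set.ofList]
  | append_singleton t x ih =>
    rw [List.foldl_append, List.foldl_append, ih]
    simp only [List.foldl_cons, List.foldl_nil]
    have hget : (t.foldl (fun d k => d.insert k (d.getD k 0 + 1))
        (PySem.Dict.empty : PySem.Dict (Int × Int) Int)).getD x 0 = (t.count x : Int) := by
      rw [PySem.Dict.getD_foldl_insert_add_one]
      simp
    rw [hget, pvS_snoc]

theorem pvB_eq (strings : List String) :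
    count_equal_pairs_alt strings = pvS (strings.map pvKey) := by
  unfold count_equal_pairs_alt
  simp only []
  rw [show (fun (st : PySem.Dict (Int × Int) Int × Int) (s : String) =>
      let key := (compute_rolling_hash s (10 ^ 9 + 7) 911, compute_rolling_hash s (10 ^ 9 + 9) 3571)
      let c := st.1.getD key 0
      (st.1.insert key (c + 1), st.2 + c))
    = (fun st s => (fun (st : PySem.Dict (Int × Int) Int × Int) (k : Int × Int) =>
        let c := st.1.getD k 0
        (st.1.insert k (c + 1), st.2 + c)) st (pvKey s)) from rfl]
  rw [← List.foldl_map (f := pvKey) (g := fun (st : PySem.Dict (Int × Int) Int × Int) (k : Int × Int) =>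
        let c := st.1.getD k 0
        (st.1.insert k (c + 1), st.2 + c)), pvB_inv]

-- ===== VERDICT (by name: the statement is the Claim_ definition above) =====
theorem count_equal_pairs_spec : Claim_equal_count_equal_pairs := by
  intro strings _
  unfold Spec_count_equal_pairs
  rw [pvA_eq, pvB_eq]
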